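-- pv_equiv track=rewrite | github.com/hl105/Python-Projects | genetics.py | hasCGBlock
-- ===== SOURCE A (Python) =====
-- def hasCGBlock(rna):
--     '''determines if sequence of CG is longer than 5'''
--     cgseq=""
--     for base in rna:
--         if base=="C" or base=="G":
--             cgseq+=base
--         else:
--             cgseq=""
--         if len(cgseq)>=5:
--             return True
--     return len(cgseq)>5
-- ===== SOURCE B (Python) =====
-- def runs(xs):
--     """split xs into maximal runs of characters that agree on membership in {'C','G'}"""
--     out = []
--     while xs:
--         key = xs[0] in ('C', 'G')
--         i = 1
--         while i < len(xs) and ((xs[i] in ('C', 'G')) == key):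
--             i += 1
--         out.append(xs[:i])
--         xs = xs[i:]
--     return out
--
-- def hasCGBlock(rna):
--     return any(g[0] in ('C', 'G') and len(g) >= 5 for g in runs(list(rna)))
-- ===== Notes on version B (the rewrite author's own statement) =====
-- stated objective: alternative
-- what changed: B segments the sequence into maximal runs grouped by whether each base is a C/G base and checks whether any such run has length at least 5, replacing A's per-character running accumulator string with an explicit run-segmentation pass.
import Mathlib
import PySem

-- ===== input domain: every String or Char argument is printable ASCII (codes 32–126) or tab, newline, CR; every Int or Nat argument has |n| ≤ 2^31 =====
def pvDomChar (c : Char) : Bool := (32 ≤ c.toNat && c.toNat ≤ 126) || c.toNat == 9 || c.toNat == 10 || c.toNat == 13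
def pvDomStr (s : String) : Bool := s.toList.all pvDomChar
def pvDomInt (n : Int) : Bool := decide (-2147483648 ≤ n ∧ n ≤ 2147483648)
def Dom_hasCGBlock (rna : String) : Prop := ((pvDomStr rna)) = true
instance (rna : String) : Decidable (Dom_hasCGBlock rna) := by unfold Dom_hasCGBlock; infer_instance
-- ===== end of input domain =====

-- B replaces A's per-character running accumulator with a run-segmentation pass
-- (maximal runs grouped by membership in {'C','G'}); objective: alternative, same cost.

-- ===== PORT A =====
-- A's loop: cgseq accumulator (string of the current C/G run), early return at length 5,
-- final `return len(cgseq) > 5` after the loop.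
def pvLoopA : List Char → List Char → Bool
  | [], cg => decide (cg.length > 5)
  | b :: rest, cg =>
    let cg' := if b == 'C' || b == 'G' then cg ++ [b] else []
    if cg'.length ≥ 5 then true else pvLoopA rest cg'

def hasCGBlock (rna : String) : Bool := pvLoopA rna.toList []

-- ===== PORT B =====
def pvIsCG (b : Char) : Bool := b == 'C' || b == 'G'

-- Source B's `runs`: split into maximal runs agreeing on membership in {'C','G'}
def pvRuns : List Char → List (List Char)
  | [] => []
  | b :: rest =>
    let key := pvIsCG b
    (b :: rest.takeWhile (fun c => pvIsCG c == key)) ::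
      pvRuns (rest.dropWhile (fun c => pvIsCG c == key))
termination_by xs => xs.length
decreasing_by
  simpa using Nat.lt_succ_of_le (List.length_dropWhile_le _ _)

-- Source B's `any(g[0] in ('C','G') and len(g) >= 5 for g in runs(...))`
def pvPred (g : List Char) : Bool :=
  match g with
  | [] => false
  | c :: _ => pvIsCG c && decide (g.length ≥ 5)

def hasCGBlock_alt (rna : String) : Bool := (pvRuns rna.toList).any pvPred

-- ===== PRECONDITION & SPEC =====
def Spec_hasCGBlock (rna : String) (out : Bool) : Prop := out = hasCGBlock_alt rna
instance (rna : String) (out : Bool) : Decidable (Spec_hasCGBlock rna out) := by unfold Spec_hasCGBlock; infer_instance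

-- ===== CLAIM (what is proved, stated in full; the proofs are below) =====
def Claim_equal_hasCGBlock : Prop := ∀ (rna : String), Dom_hasCGBlock rna → Spec_hasCGBlock rna (hasCGBlock rna)

-- ===== LEMMAS AND PROOFS =====

-- A's loop depends on cgseq only through its length: counter version.
def pvS : List Char → Nat → Bool
  | [], _ => false
  | b :: rest, k => if pvIsCG b then (if k + 1 ≥ 5 then true else pvS rest (k + 1)) else pvS rest 0

theorem pvLoopA_eq_pvS : ∀ (xs : List Char) (cg : List Char), cg.length ≤ 4 →
    pvLoopA xs cg = pvS xs cg.length := by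
  intro xs
  induction xs with
  | nil => intro cg h; simp [pvLoopA, pvS]; omega
  | cons b rest ih =>
    intro cg h
    by_cases hb : (b == 'C' || b == 'G') = true
    · simp only [pvLoopA, pvS, hb, if_pos, pvIsCG]
      simp only [List.length_append, List.length_cons, List.length_nil]
      by_cases h5 : cg.length + 1 ≥ 5
      · simp [h5]
      · have : cg.length + 1 ≤ 4 := by omega
        simp [h5, ih (cg ++ [b]) (by simpa using this)]
    · have hb' : (b == 'C' || b == 'G') = false := by simpa using hb
      simp only [pvLoopA, pvS, pvIsCG, hb', Bool.false_eq_true, if_false, List.length_nil]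
      simpa using ih [] (by simp)

theorem pvS_cg_prefix : ∀ (g : List Char) (k : Nat), (∀ c ∈ g, pvIsCG c = true) → k < 5 →
    ∀ rest : List Char, (rest = [] ∨ ∃ c t, rest = c :: t ∧ pvIsCG c = false) →
    pvS (g ++ rest) k = (decide (k + g.length ≥ 5) || pvS rest 0) := by
  intro g
  induction g with
  | nil =>
    intro k _ hk rest hrest
    rcases hrest with h | ⟨c, t, rfl, hc⟩
    · subst h; simp [pvS]; omega
    · simp only [List.nil_append, List.length_nil, Nat.add_zero]
      have : ¬ (k ≥ 5) := by omega
      simp [pvS, hc, this]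
  | cons b g' ih =>
    intro k hall hk rest hrest
    have hb : pvIsCG b = true := hall b (by simp)
    simp only [List.cons_append, pvS, hb, if_pos, List.length_cons]
    by_cases h5 : k + 1 ≥ 5
    · have : k + (g'.length + 1) ≥ 5 := by omega
      simp [h5, this]
    · have hrec := ih (k + 1) (fun c hc => hall c (by simp [hc])) (by omega) rest hrest
      rw [if_neg h5, hrec]
      have : (k + (g'.length + 1) ≥ 5) ↔ (k + 1 + g'.length ≥ 5) := by omega
      simp [this]

theorem pvS_noncg_prefix : ∀ (g : List Char) (b : Char), pvIsCG b = false →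
    (∀ c ∈ g, pvIsCG c = false) → ∀ (rest : List Char) (k : Nat),
    pvS (b :: (g ++ rest)) k = pvS rest 0 := by
  intro g
  induction g with
  | nil => intro b hb _ rest k; simp [pvS, hb]
  | cons d g' ih =>
    intro b hb hall rest k
    have hd : pvIsCG d = false := hall d (by simp)
    simp only [List.cons_append, pvS, hb, Bool.false_eq_true]
    exact ih d hd (fun c hc => hall c (by simp [hc])) rest 0

theorem dropWhile_head_char (p : Char → Bool) (l : List Char) :
    l.dropWhile p = [] ∨ ∃ c t, l.dropWhile p = c :: t ∧ p c = false := by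
  induction l with
  | nil => left; rfl
  | cons c t ih =>
    by_cases h : p c = true
    · simpa [List.dropWhile, h] using ih
    · right
      exact ⟨c, t, by simp [List.dropWhile, h], by simpa using h⟩

theorem pvRuns_any_eq_pvS : ∀ (n : Nat) (xs : List Char), xs.length ≤ n →
    (pvRuns xs).any pvPred = pvS xs 0 := by
  intro n
  induction n with
  | zero =>
    intro xs h
    have : xs = [] := List.eq_nil_of_length_eq_zero (by omega)
    subst this; simp [pvRuns, pvS]
  | succ n ih =>
    intro xs h
    cases xs with
    | nil => simp [pvRuns, pvS]
    | cons b rest =>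
      set p := fun c => pvIsCG c == pvIsCG b with hp
      have hsplit : rest.takeWhile p ++ rest.dropWhile p = rest := List.takeWhile_append_dropWhile
      have hlen : (rest.dropWhile p).length ≤ n := by
        have := List.length_dropWhile_le p rest
        simp only [List.length_cons] at h; omega
      have hIH := ih (rest.dropWhile p) hlen
      have htake : ∀ c ∈ rest.takeWhile p, pvIsCG c = pvIsCG b := by
        intro c hc
        have := List.mem_takeWhile_imp hc
        simpa [hp] using this
      have hruns : pvRuns (b :: rest) =
          (b :: rest.takeWhile p) :: pvRuns (rest.dropWhile p) := by
        rw [pvRuns]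
      rw [hruns, List.any_cons, hIH]
      by_cases hb : pvIsCG b = true
      · -- C/G run: head lemma gives the drop side starts non-CG (or is empty)
        have hdrop : rest.dropWhile p = [] ∨
            ∃ c t, rest.dropWhile p = c :: t ∧ pvIsCG c = false := by
          rcases dropWhile_head_char p rest with h0 | ⟨c, t, ht, hc⟩
          · left; exact h0
          · right; exact ⟨c, t, ht, by simpa [hp, hb] using hc⟩
        have hall : ∀ c ∈ (b :: rest.takeWhile p), pvIsCG c = true := by
          intro c hc
          rcases List.mem_cons.mp hc with rfl | hc
          · exact hb
          · rw [htake c hc]; exact hb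
        have hmain := pvS_cg_prefix (b :: rest.takeWhile p) 0 hall (by omega)
          (rest.dropWhile p) hdrop
        have hx : (b :: rest.takeWhile p) ++ rest.dropWhile p = b :: rest := by
          simp [hsplit]
        rw [hx] at hmain
        rw [hmain]
        simp [pvPred, hb, Nat.add_comm]
      · -- non-CG run: the whole prefix resets the counter
        have hb' : pvIsCG b = false := by simpa using hb
        have hallf : ∀ c ∈ rest.takeWhile p, pvIsCG c = false := by
          intro c hc; rw [htake c hc]; exact hb'
        have hmain := pvS_noncg_prefix (rest.takeWhile p) b hb' hallf
          (rest.dropWhile p) 0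
        rw [hsplit] at hmain
        rw [hmain]
        simp [pvPred, hb']

-- ===== VERDICT (by name: the statement is the Claim_ definition above) =====
theorem hasCGBlock_spec : Claim_equal_hasCGBlock := by
  intro rna _
  unfold Spec_hasCGBlock hasCGBlock hasCGBlock_alt
  rw [pvLoopA_eq_pvS rna.toList [] (by simp)]
  simpa using (pvRuns_any_eq_pvS rna.toList.length rna.toList le_rfl).symm
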